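-- pv_equiv track=rewrite | github.com/hwangbo98/co_challenge | implementation/B28358.py | count_valid_nums
-- ===== SOURCE A (Python) =====
-- def is_valid_date(month, day, forbidden_nums) :
--     month_str = f"{month}"
--     day_str = f"{day}"
--     # 여기서 고민해야 하는 부분은 한 가지임.
--     # 06월 06일은 0을 포함하지만 여기서 원하는 부분은 이런 건 고민하지 않는 거임.
--     # 10월이나 10일, 20, 30일 같이 뒤에 0이 붙는 거는 OK
--     # 위의 경우는 XXXX
--     for k in month_str + day_str :
--         if int(k) in forbidden_nums :
--             return False
--
--     return True
--
-- def count_valid_nums(result) :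
--
--     forbidden_month = [i for i, val in enumerate(result) if val == 1]
--
--     count = 0
--     days_month = [31,29,31,30,31,30,31,31,30,31,30,31]
--
--     for month in range(1, 13) :
--         for day in range(1, days_month[month-1] +1) :
--             if is_valid_date(month, day, forbidden_month) :
--                 count+=1
--
--     return count
-- ===== SOURCE B (Python) =====
-- def count_valid_nums(result):
--     forbidden_month = [i for i, val in enumerate(result) if val == 1]
--     allowed = [d for d in range(10) if d not in forbidden_month]
--     days_month = [31, 29, 31, 30, 31, 30, 31, 31, 30, 31, 30, 31]
--     total = 0
--     for month in range(1, 13):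
--         if any(int(c) in forbidden_month for c in str(month)):
--             continue
--         n = days_month[month - 1]
--         # single-digit days 1..9
--         cnt = sum(1 for d in allowed if 1 <= d <= 9)
--         # two-digit days 10..n: tens digit t, units digit u
--         full_units = len(allowed)
--         cap_units = sum(1 for d in allowed if d <= n % 10)
--         for t in range(1, n // 10 + 1):
--             if t not in forbidden_month:
--                 cnt += full_units if t < n // 10 else cap_units
--         total += cnt
--     return total
-- ===== Notes on version B (the rewrite author's own statement) =====
-- stated objective: alternative
-- what changed: B replaces A's per-day inner loop with string conversion (checking every digit of all 366 month/day pairs) by a per-month arithmetic count: it tests the month's digits once, counts allowed single-digit days, and counts two-digit days by pairing allowed tens digits with allowed units digits (capped at the month's last day), so no day is ever enumerated or stringified.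
import Mathlib
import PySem

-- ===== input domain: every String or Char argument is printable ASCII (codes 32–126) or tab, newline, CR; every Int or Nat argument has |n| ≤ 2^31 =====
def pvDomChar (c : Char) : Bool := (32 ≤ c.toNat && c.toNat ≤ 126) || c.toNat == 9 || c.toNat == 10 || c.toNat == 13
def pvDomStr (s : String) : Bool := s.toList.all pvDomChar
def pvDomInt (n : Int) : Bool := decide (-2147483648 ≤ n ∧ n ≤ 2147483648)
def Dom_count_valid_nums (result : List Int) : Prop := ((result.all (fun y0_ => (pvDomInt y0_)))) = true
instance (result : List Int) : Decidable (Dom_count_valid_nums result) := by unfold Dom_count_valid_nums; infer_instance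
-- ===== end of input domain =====

-- B replaces A's per-day loop (stringifying all 366 dates) by per-month digit arithmetic over the
-- allowed-digit list; same return value, no speed claim.

-- ===== PORT A =====
-- is_valid_date: iterates over the digit characters of f"{month}" + f"{day}"; int(k) on a decimal
-- digit character is exact as (character code - 48), since month and day are positive here.
def isValidDate (month day : Int) (forbidden_nums : List Int) : Bool :=
  ((PySem.Int.toStr month).toList ++ (PySem.Int.toStr day).toList).all
    (fun k => !(decide (((k.toNat : Int) - 48) ∈ forbidden_nums)))

def count_valid_nums (result : List Int) : Int :=
  let forbidden_month := ((PySem.List.enumerate result).filter (fun p => p.2 == 1)).map (fun p => p.1)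
  let days_month : List Int := [31,29,31,30,31,30,31,31,30,31,30,31]
  -- days_month[month-1] with 1 ≤ month ≤ 12 is always in range, so pyGetD is exact here
  (PySem.List.pyRange 1 13 1).foldl (fun count month =>
    (PySem.List.pyRange 1 ((PySem.List.pyGetD days_month (month-1) 0) + 1) 1).foldl
      (fun count day => if isValidDate month day forbidden_month then count + 1 else count) count) 0

-- ===== PORT B =====
def count_valid_nums_alt (result : List Int) : Int :=
  let forbidden_month := ((PySem.List.enumerate result).filter (fun p => p.2 == 1)).map (fun p => p.1)
  let allowed := (PySem.List.pyRange 0 10 1).filter (fun d => !(decide (d ∈ forbidden_month)))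
  let days_month : List Int := [31,29,31,30,31,30,31,31,30,31,30,31]
  (PySem.List.pyRange 1 13 1).foldl (fun total month =>
    if (PySem.Int.toStr month).toList.any (fun c => decide (((c.toNat : Int) - 48) ∈ forbidden_month)) then total
    else
      let n := PySem.List.pyGetD days_month (month-1) 0
      let cnt0 : Int := ((allowed.filter (fun d => decide (1 ≤ d ∧ d ≤ 9))).length : Int)
      let full_units : Int := (allowed.length : Int)
      let cap_units : Int := ((allowed.filter (fun d => decide (d ≤ PySem.Int.mod n 10))).length : Int)
      let cnt := (PySem.List.pyRange 1 (PySem.Int.floordiv n 10 + 1) 1).foldl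
        (fun cnt t => if !(decide (t ∈ forbidden_month)) then
            cnt + (if t < PySem.Int.floordiv n 10 then full_units else cap_units) else cnt) cnt0
      total + cnt) 0

-- ===== PRECONDITION & SPEC =====
def Spec_count_valid_nums (result : List Int) (out : Int) : Prop := out = count_valid_nums_alt result
instance (result : List Int) (out : Int) : Decidable (Spec_count_valid_nums result out) := by unfold Spec_count_valid_nums; infer_instance

-- ===== CLAIM (what is proved, stated in full; the proofs are below) =====
def Claim_equal_count_valid_nums : Prop := ∀ (result : List Int), Dom_count_valid_nums result → Spec_count_valid_nums result (count_valid_nums result)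

-- ===== LEMMAS AND PROOFS =====

theorem pvLenFilter {α : Type} (p : α → Bool) (l : List α) :
    (l.filter p).length = l.countP p := by simp [List.countP_eq_length_filter]

-- B's month loop: fold with a skip-guard is the sum of the unskipped contributions
theorem pvFoldlGuard (g : Int → Bool) (h : Int → Int) (l : List Int) (acc : Int) :
    l.foldl (fun tot m => if g m then tot else tot + h m) acc
      = acc + (l.map (fun m => if g m then 0 else h m)).sum := by
  induction l generalizing acc with
  | nil => simp
  | cons a t ih => by_cases hg : g a <;> simp [hg, ih] <;> ring

-- A's day loop: counting fold equals countP
theorem pvDayLoop (m : Int) (f : List Int) (l : List Int) (acc : Int) :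
    l.foldl (fun count day => if isValidDate m day f then count + 1 else count) acc
      = acc + (l.countP (fun day => isValidDate m day f) : Int) := by
  induction l generalizing acc with
  | nil => simp
  | cons a t ih => by_cases h : isValidDate m a f <;> simp [h, ih] <;> ring

-- closed-term evaluation facts used by the normalisation below
theorem pvRange113 : PySem.List.pyRange 1 13 1 = [1, 2, 3, 4, 5, 6, 7, 8, 9, 10, 11, 12] := by decide
theorem pvRange010 : PySem.List.pyRange 0 10 1 = [0, 1, 2, 3, 4, 5, 6, 7, 8, 9] := by decide
theorem pvRange1_3 : PySem.List.pyRange 1 3 1 = [1, 2] := by decide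
theorem pvRange1_4 : PySem.List.pyRange 1 4 1 = [1, 2, 3] := by decide
theorem pvRange1_30 : PySem.List.pyRange 1 30 1 = [1, 2, 3, 4, 5, 6, 7, 8, 9, 10, 11, 12, 13, 14, 15, 16, 17, 18, 19, 20, 21, 22, 23, 24, 25, 26, 27, 28, 29] := by decide
theorem pvRange1_31 : PySem.List.pyRange 1 31 1 = [1, 2, 3, 4, 5, 6, 7, 8, 9, 10, 11, 12, 13, 14, 15, 16, 17, 18, 19, 20, 21, 22, 23, 24, 25, 26, 27, 28, 29, 30] := by decide
theorem pvRange1_32 : PySem.List.pyRange 1 32 1 = [1, 2, 3, 4, 5, 6, 7, 8, 9, 10, 11, 12, 13, 14, 15, 16, 17, 18, 19, 20, 21, 22, 23, 24, 25, 26, 27, 28, 29, 30, 31] := by decide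
theorem pvGetD_0 : PySem.List.pyGetD ([31,29,31,30,31,30,31,31,30,31,30,31] : List Int) (0 : Int) 0 = 31 := by decide
theorem pvGetD_1 : PySem.List.pyGetD ([31,29,31,30,31,30,31,31,30,31,30,31] : List Int) (1 : Int) 0 = 29 := by decide
theorem pvGetD_2 : PySem.List.pyGetD ([31,29,31,30,31,30,31,31,30,31,30,31] : List Int) (2 : Int) 0 = 31 := by decide
theorem pvGetD_3 : PySem.List.pyGetD ([31,29,31,30,31,30,31,31,30,31,30,31] : List Int) (3 : Int) 0 = 30 := by decide
theorem pvGetD_4 : PySem.List.pyGetD ([31,29,31,30,31,30,31,31,30,31,30,31] : List Int) (4 : Int) 0 = 31 := by decide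
theorem pvGetD_5 : PySem.List.pyGetD ([31,29,31,30,31,30,31,31,30,31,30,31] : List Int) (5 : Int) 0 = 30 := by decide
theorem pvGetD_6 : PySem.List.pyGetD ([31,29,31,30,31,30,31,31,30,31,30,31] : List Int) (6 : Int) 0 = 31 := by decide
theorem pvGetD_7 : PySem.List.pyGetD ([31,29,31,30,31,30,31,31,30,31,30,31] : List Int) (7 : Int) 0 = 31 := by decide
theorem pvGetD_8 : PySem.List.pyGetD ([31,29,31,30,31,30,31,31,30,31,30,31] : List Int) (8 : Int) 0 = 30 := by decide
theorem pvGetD_9 : PySem.List.pyGetD ([31,29,31,30,31,30,31,31,30,31,30,31] : List Int) (9 : Int) 0 = 31 := by decide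
theorem pvGetD_10 : PySem.List.pyGetD ([31,29,31,30,31,30,31,31,30,31,30,31] : List Int) (10 : Int) 0 = 30 := by decide
theorem pvGetD_11 : PySem.List.pyGetD ([31,29,31,30,31,30,31,31,30,31,30,31] : List Int) (11 : Int) 0 = 31 := by decide
theorem pvFdiv_29 : PySem.Int.floordiv 29 10 = 2 := by decide
theorem pvFmod_29 : PySem.Int.mod 29 10 = 9 := by decide
theorem pvFdiv_30 : PySem.Int.floordiv 30 10 = 3 := by decide
theorem pvFmod_30 : PySem.Int.mod 30 10 = 0 := by decide
theorem pvFdiv_31 : PySem.Int.floordiv 31 10 = 3 := by decide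
theorem pvFmod_31 : PySem.Int.mod 31 10 = 1 := by decide
theorem pvToStr_1 : (PySem.Int.toStr 1).toList = ['1'] := by decide
theorem pvToStr_2 : (PySem.Int.toStr 2).toList = ['2'] := by decide
theorem pvToStr_3 : (PySem.Int.toStr 3).toList = ['3'] := by decide
theorem pvToStr_4 : (PySem.Int.toStr 4).toList = ['4'] := by decide
theorem pvToStr_5 : (PySem.Int.toStr 5).toList = ['5'] := by decide
theorem pvToStr_6 : (PySem.Int.toStr 6).toList = ['6'] := by decide
theorem pvToStr_7 : (PySem.Int.toStr 7).toList = ['7'] := by decide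
theorem pvToStr_8 : (PySem.Int.toStr 8).toList = ['8'] := by decide
theorem pvToStr_9 : (PySem.Int.toStr 9).toList = ['9'] := by decide
theorem pvToStr_10 : (PySem.Int.toStr 10).toList = ['1', '0'] := by decide
theorem pvToStr_11 : (PySem.Int.toStr 11).toList = ['1', '1'] := by decide
theorem pvToStr_12 : (PySem.Int.toStr 12).toList = ['1', '2'] := by decide
theorem pvToStr_13 : (PySem.Int.toStr 13).toList = ['1', '3'] := by decide
theorem pvToStr_14 : (PySem.Int.toStr 14).toList = ['1', '4'] := by decide
theorem pvToStr_15 : (PySem.Int.toStr 15).toList = ['1', '5'] := by decide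
theorem pvToStr_16 : (PySem.Int.toStr 16).toList = ['1', '6'] := by decide
theorem pvToStr_17 : (PySem.Int.toStr 17).toList = ['1', '7'] := by decide
theorem pvToStr_18 : (PySem.Int.toStr 18).toList = ['1', '8'] := by decide
theorem pvToStr_19 : (PySem.Int.toStr 19).toList = ['1', '9'] := by decide
theorem pvToStr_20 : (PySem.Int.toStr 20).toList = ['2', '0'] := by decide
theorem pvToStr_21 : (PySem.Int.toStr 21).toList = ['2', '1'] := by decide
theorem pvToStr_22 : (PySem.Int.toStr 22).toList = ['2', '2'] := by decide
theorem pvToStr_23 : (PySem.Int.toStr 23).toList = ['2', '3'] := by decide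
theorem pvToStr_24 : (PySem.Int.toStr 24).toList = ['2', '4'] := by decide
theorem pvToStr_25 : (PySem.Int.toStr 25).toList = ['2', '5'] := by decide
theorem pvToStr_26 : (PySem.Int.toStr 26).toList = ['2', '6'] := by decide
theorem pvToStr_27 : (PySem.Int.toStr 27).toList = ['2', '7'] := by decide
theorem pvToStr_28 : (PySem.Int.toStr 28).toList = ['2', '8'] := by decide
theorem pvToStr_29 : (PySem.Int.toStr 29).toList = ['2', '9'] := by decide
theorem pvToStr_30 : (PySem.Int.toStr 30).toList = ['3', '0'] := by decide
theorem pvToStr_31 : (PySem.Int.toStr 31).toList = ['3', '1'] := by decide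
theorem pvDigit_0 : ((('0'.toNat : Int)) - 48) = 0 := by decide
theorem pvDigit_1 : ((('1'.toNat : Int)) - 48) = 1 := by decide
theorem pvDigit_2 : ((('2'.toNat : Int)) - 48) = 2 := by decide
theorem pvDigit_3 : ((('3'.toNat : Int)) - 48) = 3 := by decide
theorem pvDigit_4 : ((('4'.toNat : Int)) - 48) = 4 := by decide
theorem pvDigit_5 : ((('5'.toNat : Int)) - 48) = 5 := by decide
theorem pvDigit_6 : ((('6'.toNat : Int)) - 48) = 6 := by decide
theorem pvDigit_7 : ((('7'.toNat : Int)) - 48) = 7 := by decide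
theorem pvDigit_8 : ((('8'.toNat : Int)) - 48) = 8 := by decide
theorem pvDigit_9 : ((('9'.toNat : Int)) - 48) = 9 := by decide

-- ===== VERDICT (by name: the statement is the Claim_ definition above) =====
set_option maxHeartbeats 16000000 in
set_option maxRecDepth 65536 in
theorem count_valid_nums_spec : Claim_equal_count_valid_nums := by
  intro result _
  show count_valid_nums result = count_valid_nums_alt result
  simp only [count_valid_nums, count_valid_nums_alt]
  generalize (((PySem.List.enumerate result).filter (fun p => p.2 == 1)).map (fun p => p.1)) = f
  simp only [pvFoldlGuard]
  simp only [pvRange113]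
  simp only [List.map_cons, List.map_nil, List.sum_cons, List.sum_nil]
  simp only [List.foldl_cons, List.foldl_nil]
  repeat simp only [Int.reduceSub, pvGetD_0, pvGetD_1, pvGetD_2, pvGetD_3, pvGetD_4, pvGetD_5, pvGetD_6, pvGetD_7, pvGetD_8, pvGetD_9, pvGetD_10, pvGetD_11, Int.reduceAdd, pvFdiv_29, pvFmod_29, pvFdiv_30, pvFmod_30, pvFdiv_31, pvFmod_31, pvRange1_3, pvRange1_4, pvRange1_30, pvRange1_31, pvRange1_32, pvRange010]
  simp only [pvDayLoop]
  repeat simp only [List.foldl_cons, List.foldl_nil]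
  repeat simp only [isValidDate, List.countP_cons, List.countP_nil, pvToStr_1, pvToStr_2, pvToStr_3, pvToStr_4, pvToStr_5, pvToStr_6, pvToStr_7, pvToStr_8, pvToStr_9, pvToStr_10, pvToStr_11, pvToStr_12, pvToStr_13, pvToStr_14, pvToStr_15, pvToStr_16, pvToStr_17, pvToStr_18, pvToStr_19, pvToStr_20, pvToStr_21, pvToStr_22, pvToStr_23, pvToStr_24, pvToStr_25, pvToStr_26, pvToStr_27, pvToStr_28, pvToStr_29, pvToStr_30, pvToStr_31, List.cons_append, List.nil_append, List.all_cons, List.all_nil, List.any_cons, List.any_nil, pvDigit_0, pvDigit_1, pvDigit_2, pvDigit_3, pvDigit_4, pvDigit_5, pvDigit_6, pvDigit_7, pvDigit_8, pvDigit_9]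
  repeat simp only [pvLenFilter, List.countP_filter, List.countP_cons, List.countP_nil]
  generalize decide ((0 : Int) ∈ f) = c0
  generalize decide ((1 : Int) ∈ f) = c1
  generalize decide ((2 : Int) ∈ f) = c2
  generalize decide ((3 : Int) ∈ f) = c3
  generalize decide ((4 : Int) ∈ f) = c4
  generalize decide ((5 : Int) ∈ f) = c5
  generalize decide ((6 : Int) ∈ f) = c6
  generalize decide ((7 : Int) ∈ f) = c7
  generalize decide ((8 : Int) ∈ f) = c8
  generalize decide ((9 : Int) ∈ f) = c9
  clear f
  revert c0 c1 c2 c3 c4 c5 c6 c7 c8 c9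
  decide
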